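-- pv_equiv track=rewrite | github.com/veritesolution/Verite-App | todolist/todo_list/main.py | resolve_command
-- ===== SOURCE A (Python) =====
-- def resolve_command(text):
--     text = text.lower()
--     if any(w in text for w in ["add", "create", "new", "make"]):
--         return "add"
--     if any(w in text for w in ["list", "show", "display", "tasks", "what to do", "what are my tasks", "what do i have to do"]):
--         return "list"
--     if any(w in text for w in ["complete", "finish", "done", "check", "mark"]):
--         return "complete"
--     if any(w in text for w in ["progress", "status", "how am i doing"]):
--         return "progress"
--     if any(w in text for w in ["bedtime", "sleep", "goodnight", "routine"]):
--         return "bedtime"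
--     if any(w in text for w in ["remove", "delete", "discard", "trash", "clear", "cancel task"]):
--         return "remove"
--     if any(w in text for w in ["exit", "stop", "quit", "bye", "leave"]):
--         return "exit"
--     return None
-- ===== SOURCE B (Python) =====
-- # Text-driven scan: walk every position of the lowered text once, test which keyword starts
-- # there, and keep the minimum priority rank seen; A instead scans keyword groups first.
-- _KEYWORDS = [
--     ("add", "add"), ("create", "add"), ("new", "add"), ("make", "add"),
--     ("list", "list"), ("show", "list"), ("display", "list"), ("tasks", "list"),
--     ("what to do", "list"), ("what are my tasks", "list"), ("what do i have to do", "list"),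
--     ("complete", "complete"), ("finish", "complete"), ("done", "complete"),
--     ("check", "complete"), ("mark", "complete"),
--     ("progress", "progress"), ("status", "progress"), ("how am i doing", "progress"),
--     ("bedtime", "bedtime"), ("sleep", "bedtime"), ("goodnight", "bedtime"), ("routine", "bedtime"),
--     ("remove", "remove"), ("delete", "remove"), ("discard", "remove"), ("trash", "remove"),
--     ("clear", "remove"), ("cancel task", "remove"),
--     ("exit", "exit"), ("stop", "exit"), ("quit", "exit"), ("bye", "exit"), ("leave", "exit"),
-- ]
--
-- def resolve_command(text):
--     t = text.lower()
--     n = len(_KEYWORDS)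
--     best = n  # sentinel: no keyword found yet
--     for i in range(len(t) + 1):
--         tail = t[i:]
--         for rank in range(n):
--             if rank < best and tail.startswith(_KEYWORDS[rank][0]):
--                 best = rank
--     return _KEYWORDS[best][1] if best < n else None
-- ===== Notes on version B (the rewrite author's own statement) =====
-- stated objective: alternative
-- what changed: Replaces A's keyword-first scan (seven if/any blocks, each keyword searched through the whole text) by a text-first scan: one pass over every position of the lowered text, testing which keywords start there and keeping the minimum priority rank, with the answer read off the flat priority table at the end.
import Mathlib
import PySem

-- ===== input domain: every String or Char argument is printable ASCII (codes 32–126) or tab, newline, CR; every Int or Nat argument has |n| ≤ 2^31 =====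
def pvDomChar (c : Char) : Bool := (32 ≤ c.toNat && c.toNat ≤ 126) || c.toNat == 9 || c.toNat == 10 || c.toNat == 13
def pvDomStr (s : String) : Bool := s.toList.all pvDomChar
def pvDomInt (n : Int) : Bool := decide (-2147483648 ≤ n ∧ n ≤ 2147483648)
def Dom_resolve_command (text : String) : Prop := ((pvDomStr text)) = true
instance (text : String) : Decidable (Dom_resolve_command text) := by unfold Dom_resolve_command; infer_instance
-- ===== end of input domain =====

-- B scans the TEXT position by position, keeping the minimum priority rank of any keyword
-- starting there, instead of A's keyword-first if/any chain (alternative; same cost).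

-- ===== PORT A =====
def resolve_command (text : String) : Option String :=
  let t := PySem.Str.lower text
  if (["add", "create", "new", "make"].any fun w => PySem.Str.isIn w t) then some "add"
  else if (["list", "show", "display", "tasks", "what to do", "what are my tasks", "what do i have to do"].any fun w => PySem.Str.isIn w t) then some "list"
  else if (["complete", "finish", "done", "check", "mark"].any fun w => PySem.Str.isIn w t) then some "complete"
  else if (["progress", "status", "how am i doing"].any fun w => PySem.Str.isIn w t) then some "progress"
  else if (["bedtime", "sleep", "goodnight", "routine"].any fun w => PySem.Str.isIn w t) then some "bedtime"
  else if (["remove", "delete", "discard", "trash", "clear", "cancel task"].any fun w => PySem.Str.isIn w t) then some "remove"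
  else if (["exit", "stop", "quit", "bye", "leave"].any fun w => PySem.Str.isIn w t) then some "exit"
  else none

-- ===== PORT B =====
def pvKeywords : List (String × String) :=
  [("add", "add"), ("create", "add"), ("new", "add"), ("make", "add"),
   ("list", "list"), ("show", "list"), ("display", "list"), ("tasks", "list"),
   ("what to do", "list"), ("what are my tasks", "list"), ("what do i have to do", "list"),
   ("complete", "complete"), ("finish", "complete"), ("done", "complete"),
   ("check", "complete"), ("mark", "complete"),
   ("progress", "progress"), ("status", "progress"), ("how am i doing", "progress"),
   ("bedtime", "bedtime"), ("sleep", "bedtime"), ("goodnight", "bedtime"), ("routine", "bedtime"),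
   ("remove", "remove"), ("delete", "remove"), ("discard", "remove"), ("trash", "remove"),
   ("clear", "remove"), ("cancel task", "remove"),
   ("exit", "exit"), ("stop", "exit"), ("quit", "exit"), ("bye", "exit"), ("leave", "exit")]

def resolve_command_alt (text : String) : Option String :=
  let t := (PySem.Str.lower text).toList
  let n := pvKeywords.length
  let best := (List.range (t.length + 1)).foldl (fun (best : Nat) (i : Nat) =>
      let tail := PySem.List.slice t (some (i : Int)) none
      (List.range n).foldl (fun best rank =>
        if rank < best ∧ PySem.Chars.startswith tail ((pvKeywords.getD rank ("", "")).1.toList) = true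
        then rank else best) best) n
  if best < n then some ((pvKeywords.getD best ("", "")).2) else none

-- ===== PRECONDITION & SPEC =====
def Spec_resolve_command (text : String) (out : Option String) : Prop := out = resolve_command_alt text
instance (text : String) (out : Option String) : Decidable (Spec_resolve_command text out) := by unfold Spec_resolve_command; infer_instance

-- ===== CLAIM (what is proved, stated in full; the proofs are below) =====
def Claim_equal_resolve_command : Prop := ∀ (text : String), Dom_resolve_command text → Spec_resolve_command text (resolve_command text)

-- ===== LEMMAS AND PROOFS =====

-- find-first over one keyword group (all pairs share a command) equals an any test for the group
theorem find_group (t : String) (xs : List String) (cmd : String) (rest : List (String × String)) :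
    (((xs.map fun w => (w, cmd)) ++ rest).find? (fun p => PySem.Str.isIn p.1 t)).map Prod.snd
      = if (xs.any fun w => PySem.Str.isIn w t) then some cmd
        else (rest.find? (fun p => PySem.Str.isIn p.1 t)).map Prod.snd := by
  induction xs with
  | nil => simp
  | cons x xs ih =>
    cases h : PySem.Str.isIn x t <;>
      simp only [List.map_cons, List.cons_append, List.find?_cons, h,
        List.any_cons, Bool.true_or, Bool.false_or, Option.map_some, ih]
    simp

-- A computes the first entry of the flat priority table whose keyword occurs in the text
theorem resolve_command_as_find (text : String) :
    resolve_command text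
      = (pvKeywords.find? fun p => PySem.Str.isIn p.1 (PySem.Str.lower text)).map Prod.snd := by
  have htab : pvKeywords =
      (["add", "create", "new", "make"].map fun w => (w, "add")) ++
      ((["list", "show", "display", "tasks", "what to do", "what are my tasks", "what do i have to do"].map fun w => (w, "list")) ++
      ((["complete", "finish", "done", "check", "mark"].map fun w => (w, "complete")) ++
      ((["progress", "status", "how am i doing"].map fun w => (w, "progress")) ++
      ((["bedtime", "sleep", "goodnight", "routine"].map fun w => (w, "bedtime")) ++
      ((["remove", "delete", "discard", "trash", "clear", "cancel task"].map fun w => (w, "remove")) ++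
      ((["exit", "stop", "quit", "bye", "leave"].map fun w => (w, "exit")) ++ ([] : List (String × String)))))))) := by
    rfl
  unfold resolve_command
  rw [htab, find_group, find_group, find_group, find_group, find_group, find_group, find_group]
  simp

-- find? over a list equals find? over its index range, reading entries back off the list
theorem find?_getD_range {α : Type} (l : List α) (p : α → Bool) (d : α) :
    l.find? p
      = ((List.range l.length).find? (fun r => p (l.getD r d))).map (fun r => l.getD r d) := by
  induction l with
  | nil => simp
  | cons x xs ih =>
    simp only [List.length_cons, List.range_succ_eq_map, List.find?_cons]
    cases h : p x with
    | true => simp [h]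
    | false =>
      simp only [h, List.getD_cons_zero, List.find?_map]
      rw [ih]
      simp [Function.comp_def]

-- first match is unchanged when the predicate agrees on all elements
theorem find?_congr_mem {α : Type} (l : List α) (p q : α → Bool) (h : ∀ a ∈ l, p a = q a) :
    l.find? p = l.find? q := by
  induction l with
  | nil => rfl
  | cons x xs ih =>
    simp only [List.find?_cons, h x List.mem_cons_self]
    cases q x with
    | true => rfl
    | false => exact ih (fun a ha => h a (List.mem_cons_of_mem _ ha))

-- inner loop: ranks ascend, so the fold keeps min of the start value and the first matching rank
theorem inner_fold (P : Nat → Bool) (n b : Nat) :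
    (List.range n).foldl (fun best rank => if (rank < best ∧ P rank = true) then rank else best) b
      = match (List.range n).find? P with
        | some r => min b r
        | none => b := by
  induction n with
  | zero => simp
  | succ n ih =>
    rw [List.range_succ, List.foldl_append, List.find?_append, ih]
    cases hf : (List.range n).find? P with
    | some r =>
      have hrn : r < n := List.mem_range.mp (List.mem_of_find?_eq_some hf)
      simp only [List.foldl_cons, List.foldl_nil, Option.some_or]
      have h1 : ¬ n < min b r := by omega
      rw [if_neg (fun hc => h1 hc.1)]
    | none =>
      simp only [List.foldl_cons, List.foldl_nil, Option.none_or, List.find?_cons, List.find?_nil]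
      cases hp : P n with
      | true => simp only [and_true]; split_ifs with h <;> simp <;> omega
      | false => simp

-- a keyword occurs in t iff it starts at some position 0..len t
theorem isIn_iff_any_start (t sub : List Char) :
    PySem.Chars.isIn sub t
      = (List.range (t.length + 1)).any (fun i => PySem.Chars.startswith (t.drop i) sub) := by
  rw [Bool.eq_iff_iff]
  rw [← PySem.Chars.exists_prefix_drop_iff_isIn]
  simp only [List.any_eq_true, List.mem_range, PySem.Chars.startswith_iff]
  constructor
  · rintro ⟨j, hj⟩
    by_cases hjl : j ≤ t.length
    · exact ⟨j, by omega, hj⟩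
    · have hnil : t.drop j = [] := List.drop_eq_nil_of_le (by omega)
      have : sub = [] := List.prefix_nil.mp (hnil ▸ hj)
      exact ⟨0, by omega, this ▸ List.nil_prefix⟩
  · rintro ⟨i, _, hi⟩
    exact ⟨i, hi⟩

-- find? on a range returns the least index satisfying the predicate
theorem find?_range_min (p : Nat → Bool) (n r : Nat) (h : (List.range n).find? p = some r) :
    p r = true ∧ r < n ∧ ∀ r' < r, p r' = false := by
  obtain ⟨hp, j, hj, hjr, hmin⟩ := List.find?_eq_some_iff_getElem.mp h
  simp only [List.getElem_range] at hjr
  subst hjr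
  refine ⟨hp, by simpa using hj, fun r' hr' => ?_⟩
  have := hmin r' hr'
  simpa [List.getElem_range] using this

theorem foldl_le_init (g : Nat → Nat → Nat) (h : ∀ b i, g b i ≤ b) (l : List Nat) (b : Nat) :
    l.foldl g b ≤ b := by
  induction l generalizing b with
  | nil => simp
  | cons x xs ih => exact le_trans (ih (g b x)) (h b x)

theorem foldl_mem_le (g : Nat → Nat → Nat) (h : ∀ b i, g b i ≤ b) (l : List Nat)
    (i0 K : Nat) (hK : ∀ b, g b i0 ≤ K) :
    ∀ b, i0 ∈ l → l.foldl g b ≤ K := by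
  induction l with
  | nil => intro b hi0; simp at hi0
  | cons x xs ih =>
    intro b hi0
    rcases List.mem_cons.mp hi0 with h0 | h0
    · subst h0
      exact le_trans (foldl_le_init g h xs (g b i0)) (hK b)
    · exact ih (g b x) h0

theorem foldl_ge (g : Nat → Nat → Nat) (l : List Nat) (k : Nat)
    (h : ∀ b i, i ∈ l → k ≤ b → k ≤ g b i) (b : Nat) (hb : k ≤ b) :
    k ≤ l.foldl g b := by
  induction l generalizing b with
  | nil => simpa
  | cons x xs ih =>
    exact ih (fun b' i hi hb' => h b' i (List.mem_cons_of_mem _ hi) hb')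
      (g b x) (h b x List.mem_cons_self hb)

-- running minimum over positions of the first matching rank = first rank matching anywhere
theorem outer_fold (P : Nat → Nat → Bool) (n m : Nat) :
    (List.range m).foldl (fun b i =>
        match (List.range n).find? (P i) with
        | some r => min b r
        | none => b) n
      = ((List.range n).find? (fun r => (List.range m).any (fun i => P i r))).getD n := by
  set g : Nat → Nat → Nat := fun b i =>
    match (List.range n).find? (P i) with
    | some r => min b r
    | none => b with hg
  have hdec : ∀ b i, g b i ≤ b := by
    intro b i
    simp only [hg]
    cases (List.range n).find? (P i) <;> simp
  cases hQ : (List.range n).find? (fun r => (List.range m).any (fun i => P i r)) with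
  | some r0 =>
    obtain ⟨hpr0, hr0n, hminQ⟩ := find?_range_min _ n r0 hQ
    obtain ⟨i0, hi0m, hPi0⟩ := List.any_eq_true.mp hpr0
    have hle : (List.range m).foldl g n ≤ r0 := by
      refine foldl_mem_le g hdec _ i0 r0 ?_ n hi0m
      intro b
      cases hf : (List.range n).find? (P i0) with
      | none =>
        exact absurd (List.find?_eq_none.mp hf r0 (List.mem_range.mpr hr0n)) (by simp [hPi0])
      | some r'' =>
        obtain ⟨hpr'', hr''n, hmin'⟩ := find?_range_min _ n r'' hf
        have : r'' ≤ r0 := by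
          by_contra hc
          have := hmin' r0 (Nat.lt_of_not_le fun hle' => hc hle')
          simp [hPi0] at this
        simp only [hg, hf]
        omega
    have hge : r0 ≤ (List.range m).foldl g n := by
      apply foldl_ge g _ r0 _ n (le_of_lt hr0n)
      intro b i hi hb
      simp only [hg]
      cases hf : (List.range n).find? (P i) with
      | none => exact hb
      | some r =>
        have hPir : P i r = true := List.find?_some hf
        have hr0r : r0 ≤ r := by
          by_contra hc
          have hfalse : ((List.range m).any fun i => P i r) = false := by
            simpa using hminQ r (Nat.lt_of_not_le fun hle' => hc hle')
          exact absurd hPir (List.any_eq_false.mp hfalse i hi)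
        show r0 ≤ min b r
        omega
    simp only [Option.getD_some]
    omega
  | none =>
    have hnone : ∀ i ∈ List.range m, ∀ r, P i r = true → ¬ r < n := by
      intro i hi r hP hrn
      have hfalse : ((List.range m).any fun i => P i r) = false := by
        simpa using List.find?_eq_none.mp hQ r (List.mem_range.mpr hrn)
      exact absurd hP (List.any_eq_false.mp hfalse i hi)
    have hge : n ≤ (List.range m).foldl g n := by
      apply foldl_ge g _ n _ n le_rfl
      intro b i hi hb
      simp only [hg]
      cases hf : (List.range n).find? (P i) with
      | none => exact hb
      | some r =>
        have hrn : r < n := List.mem_range.mp (List.mem_of_find?_eq_some hf)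
        exact absurd hrn (hnone i hi r (List.find?_some hf))
    have hle := foldl_le_init g hdec (List.range m) n
    simp only [Option.getD_none]
    omega

-- the nested position/rank scan computes the index of the first keyword occurring in t
theorem core_fold (t : List Char) :
    (List.range (t.length + 1)).foldl (fun (best : Nat) (i : Nat) =>
        (List.range pvKeywords.length).foldl (fun best rank =>
          if rank < best ∧ PySem.Chars.startswith (PySem.List.slice t (some (i : Int)) none)
              ((pvKeywords.getD rank ("", "")).1.toList) = true
          then rank else best) best) pvKeywords.length
      = ((List.range pvKeywords.length).find?
          (fun r => PySem.Chars.isIn ((pvKeywords.getD r ("", "")).1.toList) t)).getD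
          pvKeywords.length := by
  have h1 : (List.range (t.length + 1)).foldl (fun (best : Nat) (i : Nat) =>
        (List.range pvKeywords.length).foldl (fun best rank =>
          if rank < best ∧ PySem.Chars.startswith (PySem.List.slice t (some (i : Int)) none)
              ((pvKeywords.getD rank ("", "")).1.toList) = true
          then rank else best) best) pvKeywords.length
      = (List.range (t.length + 1)).foldl (fun (b : Nat) (i : Nat) =>
          match (List.range pvKeywords.length).find?
              (fun rank => PySem.Chars.startswith (PySem.List.slice t (some (i : Int)) none)
                ((pvKeywords.getD rank ("", "")).1.toList)) with
          | some r => min b r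
          | none => b) pvKeywords.length :=
    PySem.List.foldl_congr_mem _ _ _ pvKeywords.length
      (fun (acc : Nat) (i : Nat) _ => inner_fold
        (fun rank => PySem.Chars.startswith (PySem.List.slice t (some (i : Int)) none)
          ((pvKeywords.getD rank ("", "")).1.toList)) pvKeywords.length acc)
  have h2 := outer_fold (fun i rank => PySem.Chars.startswith (PySem.List.slice t (some (i : Int)) none)
        ((pvKeywords.getD rank ("", "")).1.toList)) pvKeywords.length (t.length + 1)
  have h3 : ((List.range pvKeywords.length).find?
        (fun r => (List.range (t.length + 1)).any
          (fun i => PySem.Chars.startswith (PySem.List.slice t (some (i : Int)) none)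
            ((pvKeywords.getD r ("", "")).1.toList)))).getD pvKeywords.length
      = ((List.range pvKeywords.length).find?
          (fun r => PySem.Chars.isIn ((pvKeywords.getD r ("", "")).1.toList) t)).getD
          pvKeywords.length := by
    refine congrArg (fun o => Option.getD o pvKeywords.length) ?_
    refine find?_congr_mem _ _ _ (fun r _ => ?_)
    rw [isIn_iff_any_start]
    refine (PySem.List.any_congr_mem (fun i _ => ?_)).symm
    rw [PySem.List.slice_from_natCast]
  exact (h1.trans h2).trans h3

-- B also computes the first entry of the flat priority table whose keyword occurs in the text
theorem alt_eq_find (text : String) :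
    resolve_command_alt text
      = ((pvKeywords.find? fun p =>
            PySem.Str.isIn p.1 (PySem.Str.lower text)).map Prod.snd) := by
  simp only [resolve_command_alt]
  rw [core_fold]
  rw [find?_getD_range pvKeywords (fun p => PySem.Str.isIn p.1 (PySem.Str.lower text)) ("", "")]
  rw [find?_congr_mem (List.range pvKeywords.length)
    (fun r => PySem.Chars.isIn ((pvKeywords.getD r ("", "")).1.toList) (PySem.Str.lower text).toList)
    (fun r => PySem.Str.isIn (pvKeywords.getD r ("", "")).1 (PySem.Str.lower text))
    (fun r _ => by simp)]
  cases hC : (List.range pvKeywords.length).find?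
      (fun r => PySem.Str.isIn (pvKeywords.getD r ("", "")).1 (PySem.Str.lower text)) with
  | some r =>
    have hrn : r < pvKeywords.length := List.mem_range.mp (List.mem_of_find?_eq_some hC)
    simp [hrn]
  | none => simp

theorem resolve_command_eq (text : String) :
    resolve_command text = resolve_command_alt text :=
  (resolve_command_as_find text).trans (alt_eq_find text).symm

-- ===== VERDICT (by name: the statement is the Claim_ definition above) =====
theorem resolve_command_spec : Claim_equal_resolve_command := by
  intro text _
  exact (resolve_command_eq text).symm ▸ rfl
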